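-- pv_equiv track=rewrite | github.com/dashIink/DistributedFinalAssignment | file-handler-server/modules/Utils.py | even_chunk_iterator
-- ===== SOURCE A (Python) =====
-- from typing import Dict, Iterator, List, Tuple
-- from typing import Dict, List, Tuple, Iterator
--
-- def even_chunk_iterator(data: Dict[str, List[Tuple[str, int]]]) -> Iterator[Tuple[str, Tuple[str, int]]]:
--     """
--     Iterates over a dictionary of type Dict[str, List[Tuple[str, int]]] in an even manner across all keys.
--
--     :param data: Dictionary with keys as strings and values as lists of tuples (string, int).
--     :return: An iterator that yields a tuple consisting of the key and one of its associated value tuples in an even manner.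
--     """
--     # Create an iterator for each list in the dictionary
--     iterators = {key: iter(value) for key, value in data.items()}
--
--     # Continue until all iterators are exhausted
--     while iterators:
--         # Iterate over a copy of the keys to allow modification of the original during iteration
--         for key in list(iterators.keys()):
--             try:
--                 # Yield the next item from the current iterator
--                 yield key, next(iterators[key])
--             except StopIteration:
--                 # Remove the iterator if it's exhausted
--                 del iterators[key]
-- ===== SOURCE B (Python) =====
-- from typing import Dict, Iterator, List, Tuple
--
--
-- def even_chunk_iterator(data: Dict[str, List[Tuple[str, int]]]) -> Iterator[Tuple[str, Tuple[str, int]]]: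
--     """Round-robin by round index: round r yields value[r] for every key whose
--     list is long enough, in dict order -- no per-key iterators, no deletion."""
--     max_len = max((len(value) for value in data.values()), default=0)
--     for r in range(max_len):
--         for key, value in data.items():
--             if len(value) > r:
--                 yield key, value[r]
-- ===== Notes on version B (the rewrite author's own statement) =====
-- stated objective: simpler
-- what changed: Replaces the mutating per-key iterator dict with try/except and mid-loop deletion by a pure double loop over the round index r, emitting value[r] for each key whose list is long enough.
import Mathlib
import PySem

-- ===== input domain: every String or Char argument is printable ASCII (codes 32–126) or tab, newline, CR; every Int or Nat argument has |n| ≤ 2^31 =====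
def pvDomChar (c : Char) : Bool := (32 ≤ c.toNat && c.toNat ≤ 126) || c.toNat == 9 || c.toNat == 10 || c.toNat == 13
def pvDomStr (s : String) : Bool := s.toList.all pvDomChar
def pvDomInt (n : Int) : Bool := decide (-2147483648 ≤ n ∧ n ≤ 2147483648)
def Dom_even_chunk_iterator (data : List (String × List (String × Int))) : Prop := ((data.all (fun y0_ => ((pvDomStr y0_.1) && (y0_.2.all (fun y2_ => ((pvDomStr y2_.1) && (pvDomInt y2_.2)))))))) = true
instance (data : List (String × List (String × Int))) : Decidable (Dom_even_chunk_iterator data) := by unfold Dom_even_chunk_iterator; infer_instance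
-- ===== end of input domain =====

-- B replaces A's mutating per-key iterator dict (with try/except and mid-loop
-- deletion) by a pure double loop over the round index; objective: simpler.


-- ===== PORT A =====
-- A keeps a dict key → iterator; one pass of the `for key in list(iterators.keys())`
-- loop yields the head of every non-exhausted iterator (pvYieldsA) and keeps the
-- tails, deleting exhausted keys (pvAdvanceA); the while loop repeats until empty.

-- the remaining state after one pass of A's for-loop (`del` removes exhausted keys)
def pvAdvanceA (its : List (String × List (String × Int))) : List (String × List (String × Int)) :=
  its.filterMap (fun p => match p.2 with | [] => none | _ :: t => some (p.1, t))

-- the items yielded during one pass of A's for-loop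
def pvYieldsA (its : List (String × List (String × Int))) : List (String × (String × Int)) :=
  its.filterMap (fun p => match p.2 with | [] => none | x :: _ => some (p.1, x))

-- termination measure for A's while loop
def pvMeasureA (its : List (String × List (String × Int))) : Nat :=
  (its.map (fun p => p.2.length + 1)).sum

theorem pvMeasureA_advance_le (its : List (String × List (String × Int))) :
    pvMeasureA (pvAdvanceA its) ≤ pvMeasureA its := by
  induction its with
  | nil => simp [pvMeasureA, pvAdvanceA]
  | cons p rest ih =>
    rcases p with ⟨k, v⟩
    cases v with
    | nil =>
      simp only [pvMeasureA, pvAdvanceA, List.filterMap_cons, List.map_cons,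
        List.sum_cons, List.length_nil] at *
      omega
    | cons x t =>
      simp only [pvMeasureA, pvAdvanceA, List.filterMap_cons, List.map_cons,
        List.sum_cons, List.length_cons] at *
      omega

theorem pvMeasureA_advance_lt (its : List (String × List (String × Int))) (h : its ≠ []) :
    pvMeasureA (pvAdvanceA its) < pvMeasureA its := by
  cases its with
  | nil => exact absurd rfl h
  | cons p rest =>
    have hle := pvMeasureA_advance_le rest
    rcases p with ⟨k, v⟩
    cases v with
    | nil =>
      simp only [pvMeasureA, pvAdvanceA, List.filterMap_cons, List.map_cons,
        List.sum_cons, List.length_nil] at *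
      omega
    | cons x t =>
      simp only [pvMeasureA, pvAdvanceA, List.filterMap_cons, List.map_cons,
        List.sum_cons, List.length_cons] at *
      omega

-- A's `while iterators:` loop
def pvLoopA (its : List (String × List (String × Int))) : List (String × (String × Int)) :=
  if h : its = [] then []
  else pvYieldsA its ++ pvLoopA (pvAdvanceA its)
termination_by pvMeasureA its
decreasing_by exact pvMeasureA_advance_lt its h

def even_chunk_iterator (data : List (String × List (String × Int))) : List (String × (String × Int)) :=
  pvLoopA data

-- ===== PORT B =====
-- B: max_len = max((len(v) for v in data.values()), default=0); for r in
-- range(max_len): for key, value in data.items(): if len(value) > r: yield key, value[r]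
def even_chunk_iterator_alt (data : List (String × List (String × Int))) : List (String × (String × Int)) :=
  let maxLen := data.foldl (fun m p => max m p.2.length) 0
  (List.range maxLen).flatMap (fun r =>
    data.filterMap (fun p => (p.2[r]?).map (fun x => (p.1, x))))

-- ===== PRECONDITION & SPEC =====
def Spec_even_chunk_iterator (data : List (String × List (String × Int))) (out : List (String × (String × Int))) : Prop := out = even_chunk_iterator_alt data
instance (data : List (String × List (String × Int))) (out : List (String × (String × Int))) : Decidable (Spec_even_chunk_iterator data out) := by unfold Spec_even_chunk_iterator; infer_instance

-- ===== CLAIM (what is proved, stated in full; the proofs are below) =====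
def Claim_equal_even_chunk_iterator : Prop := ∀ (data : List (String × List (String × Int))), Dom_even_chunk_iterator data → Spec_even_chunk_iterator data (even_chunk_iterator data)

-- ===== LEMMAS AND PROOFS =====

-- one round of B at index r
def pvRoundB (data : List (String × List (String × Int))) (r : Nat) : List (String × (String × Int)) :=
  data.filterMap (fun p => (p.2[r]?).map (fun x => (p.1, x)))

theorem pvRoundB_zero (its : List (String × List (String × Int))) :
    pvRoundB its 0 = pvYieldsA its := by
  unfold pvRoundB pvYieldsA
  induction its with
  | nil => rfl
  | cons p rest ih =>
    cases h : p.2 with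
    | nil => simp [List.filterMap_cons, h, ih]
    | cons x t => simp [List.filterMap_cons, h, ih]

theorem pvRoundB_advance (its : List (String × List (String × Int))) (r : Nat) :
    pvRoundB (pvAdvanceA its) r = pvRoundB its (r + 1) := by
  unfold pvRoundB pvAdvanceA
  induction its with
  | nil => rfl
  | cons p rest ih =>
    cases h : p.2 with
    | nil => simp [List.filterMap_cons, h, ih]
    | cons x t => simp [List.filterMap_cons, h, ih]

theorem pvAdvanceA_len_le (its : List (String × List (String × Int))) (m : Nat)
    (hb : ∀ p ∈ its, p.2.length ≤ m + 1) :
    ∀ q ∈ pvAdvanceA its, q.2.length ≤ m := by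
  intro q hq
  rcases List.mem_filterMap.mp hq with ⟨p, hp, he⟩
  cases h : p.2 with
  | nil => simp [h] at he
  | cons x t =>
    simp [h] at he
    have := hb p hp
    rw [h] at this
    simp at this
    subst he
    simpa using this

-- main loop invariant: A's while loop equals B's flatMap over any enough rounds
theorem pvLoopA_eq_rounds (m : Nat) :
    ∀ (its : List (String × List (String × Int))),
      (∀ p ∈ its, p.2.length ≤ m) →
      pvLoopA its = (List.range m).flatMap (pvRoundB its) := by
  induction m with
  | zero =>
    intro its hb
    rw [pvLoopA]
    by_cases h : its = []
    · simp [h]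
    · simp only [h, dite_false]
      have hy : pvYieldsA its = [] := by
        unfold pvYieldsA
        refine List.filterMap_eq_nil_iff.mpr ?_
        intro p hp
        have := hb p hp
        cases hv : p.2 with
        | nil => simp [hv]
        | cons x t => rw [hv] at this; simp at this
      have ha : pvAdvanceA its = [] := by
        unfold pvAdvanceA
        refine List.filterMap_eq_nil_iff.mpr ?_
        intro p hp
        have := hb p hp
        cases hv : p.2 with
        | nil => simp [hv]
        | cons x t => rw [hv] at this; simp at this
      rw [hy, ha, pvLoopA]
      simp
  | succ n ih =>
    intro its hb
    rw [pvLoopA]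
    by_cases h : its = []
    · subst h; simp [pvRoundB]
    · simp only [h, dite_false]
      have hadv : pvLoopA (pvAdvanceA its) = (List.range n).flatMap (pvRoundB (pvAdvanceA its)) :=
        ih (pvAdvanceA its) (pvAdvanceA_len_le its n hb)
      rw [hadv]
      have hshift : (List.range n).flatMap (pvRoundB (pvAdvanceA its))
          = (List.range n).flatMap (fun r => pvRoundB its (r + 1)) := by
        refine List.flatMap_congr (fun r _ => ?_)
        exact pvRoundB_advance its r
      rw [hshift, List.range_succ_eq_map]
      simp only [List.flatMap_cons, List.flatMap_map]
      rw [pvRoundB_zero]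

theorem pv_len_le_foldl (data : List (String × List (String × Int))) :
    ∀ p ∈ data, p.2.length ≤ data.foldl (fun m p => max m p.2.length) 0 := by
  -- generalized claim with arbitrary accumulator
  have key : ∀ (l : List (String × List (String × Int))) (a : Nat),
      (a ≤ l.foldl (fun m p => max m p.2.length) a) ∧
      (∀ p ∈ l, p.2.length ≤ l.foldl (fun m p => max m p.2.length) a) := by
    intro l
    induction l with
    | nil => intro a; exact ⟨Nat.le_refl a, by simp⟩
    | cons q rest ih =>
      intro a
      constructor
      · simp only [List.foldl_cons]
        exact le_trans (le_max_left a q.2.length) (ih (max a q.2.length)).1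
      · intro p hp
        simp only [List.foldl_cons]
        rcases List.mem_cons.mp hp with h | h
        · subst h
          exact le_trans (le_max_right a p.2.length) (ih (max a p.2.length)).1
        · exact (ih (max a q.2.length)).2 p h
  exact (key data 0).2

-- ===== VERDICT (by name: the statement is the Claim_ definition above) =====
theorem even_chunk_iterator_spec : Claim_equal_even_chunk_iterator := by
  intro data _
  unfold Spec_even_chunk_iterator even_chunk_iterator even_chunk_iterator_alt
  exact pvLoopA_eq_rounds _ data (pv_len_le_foldl data)
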